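-- pv_equiv track=rewrite | github.com/vmasrani/dotfiles | .python/job_submitter.py | make_hyper_string
-- ===== SOURCE A (Python) =====
-- import itertools
--
-- def make_hyper_string(hyper_dict):
--     # Check all values are iterable lists
--     def type_check(value):
--         return value if isinstance(value, list) else [value]
--
--     hyper_dict = {key: type_check(value) for key, value in hyper_dict.items()}
--
--     commands = []
--     for args in itertools.product(*hyper_dict.values()):
--         command = "".join(["{}={} ".format(k, v) for k, v in zip(hyper_dict.keys(), args)])
--         commands.append(command[:-1])
--
--     return commands
-- ===== SOURCE B (Python) =====
-- def make_hyper_string(hyper_dict):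
--     # Iterative fold instead of itertools.product: grow the command strings
--     # key by key (prefix outer, value inner, so the rightmost key varies fastest).
--     def type_check(value):
--         return value if isinstance(value, list) else [value]
--
--     acc = [""]
--     for key, value in hyper_dict.items():
--         vals = type_check(value)
--         acc = ["{}{}={} ".format(prefix, key, v) for prefix in acc for v in vals]
--     return [s[:-1] for s in acc]
-- ===== Notes on version B (the rewrite author's own statement) =====
-- stated objective: alternative
-- what changed: Replaces the itertools.product over all value lists plus a per-combination zip/join/strip with a single fold that extends the partial command strings key by key (prefix outer, value inner), so no tuple of arguments or per-combination join is ever materialised.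
import Mathlib
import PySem

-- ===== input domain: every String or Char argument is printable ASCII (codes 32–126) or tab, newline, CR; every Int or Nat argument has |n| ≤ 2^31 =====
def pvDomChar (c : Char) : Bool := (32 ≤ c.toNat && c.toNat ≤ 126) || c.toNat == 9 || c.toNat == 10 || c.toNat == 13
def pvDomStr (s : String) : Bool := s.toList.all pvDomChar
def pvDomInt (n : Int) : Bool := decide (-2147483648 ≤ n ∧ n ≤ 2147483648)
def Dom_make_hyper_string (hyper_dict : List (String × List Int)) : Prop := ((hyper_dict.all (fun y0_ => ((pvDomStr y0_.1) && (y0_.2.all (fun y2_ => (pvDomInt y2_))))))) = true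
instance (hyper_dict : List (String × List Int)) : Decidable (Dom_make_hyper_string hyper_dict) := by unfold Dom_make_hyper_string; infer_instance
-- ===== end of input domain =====

-- B replaces itertools.product + per-combination zip/join/strip by one fold that
-- extends the partial command strings key by key (alternative decomposition, same cost).


-- ===== PORT A =====
-- itertools.product over a list of pools, in CPython's order (rightmost pool varies fastest)
def pvProduct {α : Type} : List (List α) → List (List α)
  | [] => [[]]
  | pool :: rest => pool.flatMap (fun v => (pvProduct rest).map (fun t => v :: t))

-- literal port of A; under the type convention every value already is a list, so
-- type_check / the dict rebuild are the identity; "{}={} ".format(k, v) is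
-- k ++ "=" ++ str(v) ++ " "; "".join is PySem.Chars.join []; command[:-1] is dropLast (exact, PySem.Chars slice_to_neg_one)
def make_hyper_string (hyper_dict : List (String × List Int)) : List String :=
  let keys := hyper_dict.map (fun kv => kv.1)
  let vals := hyper_dict.map (fun kv => kv.2)
  (pvProduct vals).map (fun args =>
    let command := PySem.Chars.join []
      ((keys.zip args).map (fun kv => kv.1.toList ++ ('=' :: PySem.Int.toChars kv.2) ++ [' ']))
    String.ofList command.dropLast)

-- ===== PORT B =====
-- literal port of Source B: fold over the items extending each prefix string; s[:-1] is dropLast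
def make_hyper_string_alt (hyper_dict : List (String × List Int)) : List String :=
  let acc := hyper_dict.foldl
    (fun acc kv =>
      acc.flatMap (fun pre => kv.2.map (fun v => pre ++ kv.1.toList ++ ('=' :: PySem.Int.toChars v) ++ [' '])))
    [([] : List Char)]
  acc.map (fun s => String.ofList s.dropLast)

-- ===== PRECONDITION & SPEC =====
-- Pre_ excludes association lists with duplicate keys: A's argument is a Python dict,
-- which cannot contain duplicate keys, so such lists represent no actual Python input
-- (Python's dict construction would collapse them, keeping the last value).
def Pre_make_hyper_string (hyper_dict : List (String × List Int)) : Prop :=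
  (hyper_dict.map (fun kv => kv.1)).Nodup
instance (hyper_dict : List (String × List Int)) : Decidable (Pre_make_hyper_string hyper_dict) := by unfold Pre_make_hyper_string; infer_instance
def pvWitness_make_hyper_string : (List (String × List Int)) := [("a", [1, 2]), ("b", [3])]

def Spec_make_hyper_string (hyper_dict : List (String × List Int)) (out : List String) : Prop := out = make_hyper_string_alt hyper_dict
instance (hyper_dict : List (String × List Int)) (out : List String) : Decidable (Spec_make_hyper_string hyper_dict out) := by unfold Spec_make_hyper_string; infer_instance

-- ===== CLAIM (what is proved, stated in full; the proofs are below) =====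
def Claim_equal_make_hyper_string : Prop := ∀ (hyper_dict : List (String × List Int)), Dom_make_hyper_string hyper_dict → Pre_make_hyper_string hyper_dict → Spec_make_hyper_string hyper_dict (make_hyper_string hyper_dict)

-- ===== LEMMAS AND PROOFS =====
theorem pvJoin_nil_eq_flatten (parts : List (List Char)) :
    PySem.Chars.join [] parts = parts.flatten := by
  induction parts with
  | nil => rfl
  | cons p ps ih =>
    simp [PySem.Chars.join, List.intercalate] at *
    cases ps with
    | nil => simp
    | cons q qs => simpa [PySem.Chars.join, List.intercalate, List.intersperse] using ih

-- the fold invariant: folding the remaining items over an accumulator appends to each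
-- prefix exactly the flattened zip-pieces of each product combination.
theorem pvFold_eq_product (hd : List (String × List Int)) (acc : List (List Char)) :
    hd.foldl
      (fun acc kv =>
        acc.flatMap (fun pre => kv.2.map (fun v => pre ++ kv.1.toList ++ ('=' :: PySem.Int.toChars v) ++ [' '])))
      acc
    = acc.flatMap (fun pre =>
        (pvProduct (hd.map (fun kv => kv.2))).map (fun args =>
          pre ++ (((hd.map (fun kv => kv.1)).zip args).map
            (fun kv => kv.1.toList ++ ('=' :: PySem.Int.toChars kv.2) ++ [' '])).flatten)) := by
  induction hd generalizing acc with
  | nil => simp [pvProduct]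
  | cons kv rest ih =>
    simp only [List.foldl_cons, ih, pvProduct, List.map_cons]
    simp [List.flatMap_map, List.map_flatMap, List.flatMap_assoc, Function.comp_def,
      List.map_map, List.append_assoc, List.zip_cons_cons]

theorem make_hyper_string_eq (hd : List (String × List Int)) :
    make_hyper_string hd = make_hyper_string_alt hd := by
  unfold make_hyper_string make_hyper_string_alt
  simp only [pvFold_eq_product, pvJoin_nil_eq_flatten]
  simp [Function.comp]

-- ===== VERDICT (by name: the statement is the Claim_ definition above) =====
theorem make_hyper_string_spec : Claim_equal_make_hyper_string := by
  intro hd _ _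
  unfold Spec_make_hyper_string
  exact make_hyper_string_eq hd
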